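-- pv_equiv track=rewrite | github.com/pioneer0317/ai-simulator | Phase 2/backend/app/services/agents/orchestrator_agent.py | _classify_stance
-- ===== SOURCE A (Python) =====
-- def _classify_stance(recommendation: str) -> str:
--     """Reduce a recommendation into a coarse decision stance for conflict detection."""
--     normalized = recommendation.lower()
--     if any(keyword in normalized for keyword in ["delay", "hold", "validate", "staging"]):
--         return "caution"
--     if any(keyword in normalized for keyword in ["launch", "deploy", "approve", "move"]):
--         return "speed"
--     if any(keyword in normalized for keyword in ["protocol", "exception", "review", "governance"]):
--         return "governance"
--     if any(keyword in normalized for keyword in ["request", "context", "calendar", "verify"]):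
--         return "clarify"
--     return "mixed"
-- ===== SOURCE B (Python) =====
-- _GROUPS = [
--     ["delay", "hold", "validate", "staging"],
--     ["launch", "deploy", "approve", "move"],
--     ["protocol", "exception", "review", "governance"],
--     ["request", "context", "calendar", "verify"],
-- ]
-- _STANCES = ["caution", "speed", "governance", "clarify", "mixed"]
--
--
-- def _first_group_at(s, i):
--     """Index of the highest-priority keyword group with a keyword starting at position i, else 4."""
--     for p, kws in enumerate(_GROUPS):
--         if any(s.startswith(kw, i) for kw in kws):
--             return p
--     return 4
--
--
-- def _classify_stance(recommendation: str) -> str: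
--     """Single left-to-right scan of the text: at each position take the best
--     keyword group starting there, keep the running minimum, map it to a stance."""
--     normalized = recommendation.lower()
--     best = 4
--     for i in range(len(normalized)):
--         best = min(best, _first_group_at(normalized, i))
--     return _STANCES[best]
-- ===== Notes on version B (the rewrite author's own statement) =====
-- stated objective: alternative
-- what changed: Instead of A's four whole-string substring-membership branches, B makes one left-to-right scan over text positions, computing at each position the best-priority keyword group starting there and keeping the running minimum, then maps that minimum to a stance.
import Mathlib
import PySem

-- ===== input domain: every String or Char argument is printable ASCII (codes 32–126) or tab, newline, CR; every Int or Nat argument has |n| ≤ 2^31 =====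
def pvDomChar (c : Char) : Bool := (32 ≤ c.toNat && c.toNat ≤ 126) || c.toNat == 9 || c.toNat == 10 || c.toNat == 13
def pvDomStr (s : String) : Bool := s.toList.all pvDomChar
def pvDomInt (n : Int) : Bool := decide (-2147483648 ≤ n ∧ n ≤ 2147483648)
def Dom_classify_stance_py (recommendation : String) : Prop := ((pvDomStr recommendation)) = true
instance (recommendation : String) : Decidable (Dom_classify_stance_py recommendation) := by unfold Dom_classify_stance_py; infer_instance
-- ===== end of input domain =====

-- B replaces A's four whole-string membership branches by one left-to-right scan of the
-- text keeping the running minimum of the keyword-group index starting at each position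
-- (alternative traversal; same result, no speed claim).

-- ===== PORT A =====
def classify_stance_py (recommendation : String) : String :=
  let normalized := PySem.Str.lower recommendation
  if ["delay", "hold", "validate", "staging"].any (fun keyword => PySem.Str.isIn keyword normalized) then
    "caution"
  else if ["launch", "deploy", "approve", "move"].any (fun keyword => PySem.Str.isIn keyword normalized) then
    "speed"
  else if ["protocol", "exception", "review", "governance"].any (fun keyword => PySem.Str.isIn keyword normalized) then
    "governance"
  else if ["request", "context", "calendar", "verify"].any (fun keyword => PySem.Str.isIn keyword normalized) then
    "clarify"
  else
    "mixed"

-- ===== PORT B =====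
def stanceGroups : List (List (List Char)) :=
  [["delay".toList, "hold".toList, "validate".toList, "staging".toList],
   ["launch".toList, "deploy".toList, "approve".toList, "move".toList],
   ["protocol".toList, "exception".toList, "review".toList, "governance".toList],
   ["request".toList, "context".toList, "calendar".toList, "verify".toList]]

def stanceNames : List String := ["caution", "speed", "governance", "clarify", "mixed"]

def firstGroupLoop (suffix : List Char) : List (List (List Char)) → Nat → Nat
  | [], _ => 4
  | kws :: rest, p =>
      if kws.any (fun kw => PySem.Chars.startswith suffix kw) then p
      else firstGroupLoop suffix rest (p + 1)

-- `s.startswith(kw, i)` for 0 ≤ i ≤ len(s) is exactly `Chars.startswith (s.drop i) kw` (exact there)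
def firstGroupAt (cs : List Char) (i : Nat) : Nat :=
  firstGroupLoop (cs.drop i) stanceGroups 0

def classify_stance_py_alt (recommendation : String) : String :=
  let normalized := PySem.Str.lower recommendation
  let cs := normalized.toList
  let best := (List.range cs.length).foldl (fun best i => min best (firstGroupAt cs i)) 4
  stanceNames.getD best "mixed"   -- _STANCES[best]; best ≤ 4 always, so the default is unreachable

-- ===== PRECONDITION & SPEC =====
def Spec_classify_stance_py (recommendation : String) (out : String) : Prop := out = classify_stance_py_alt recommendation
instance (recommendation : String) (out : String) : Decidable (Spec_classify_stance_py recommendation out) := by unfold Spec_classify_stance_py; infer_instance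

-- ===== CLAIM (what is proved, stated in full; the proofs are below) =====
def Claim_equal_classify_stance_py : Prop := ∀ (recommendation : String), Dom_classify_stance_py recommendation → Spec_classify_stance_py recommendation (classify_stance_py recommendation)

-- ===== LEMMAS AND PROOFS =====

-- 'sub in (c::cs)': sub occurs iff it starts at position 0 or occurs in the tail
theorem pv_isIn_cons (sub : List Char) (c : Char) (cs : List Char) :
    PySem.Chars.isIn sub (c :: cs) =
      (PySem.Chars.startswith (c :: cs) sub || PySem.Chars.isIn sub cs) := by
  rw [Bool.eq_iff_iff]
  simp [PySem.Chars.isIn_iff_infix, PySem.Chars.startswith_iff, List.infix_cons_iff]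

theorem pv_anyIn_cons (g : List (List Char)) (c : Char) (cs : List Char) :
    g.any (fun kw => PySem.Chars.isIn kw (c :: cs)) =
      (g.any (fun kw => PySem.Chars.startswith (c :: cs) kw) ||
       g.any (fun kw => PySem.Chars.isIn kw cs)) := by
  induction g with
  | nil => simp
  | cons kw g ih =>
      rw [List.any_cons, pv_isIn_cons, ih, List.any_cons, List.any_cons]
      cases PySem.Chars.startswith (c :: cs) kw <;> cases PySem.Chars.isIn kw cs <;>
        cases g.any (fun kw => PySem.Chars.startswith (c :: cs) kw) <;> simp

theorem pv_foldl_min_init {α : Type} (g : α → Nat) (l : List α) (a x : Nat) :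
    l.foldl (fun b i => min b (g i)) (min x a) =
      min x (l.foldl (fun b i => min b (g i)) a) := by
  induction l generalizing a with
  | nil => rfl
  | cons y l ih => simp only [List.foldl_cons, Nat.min_assoc, ih]

def pvScan (cs : List Char) : Nat :=
  (List.range cs.length).foldl (fun best i => min best (firstGroupAt cs i)) 4

theorem pv_scan_cons (c : Char) (cs : List Char) :
    pvScan (c :: cs) = min (firstGroupAt (c :: cs) 0) (pvScan cs) := by
  unfold pvScan
  rw [List.length_cons, List.range_succ_eq_map, List.foldl_cons, List.foldl_map]
  have hdrop : ∀ i : Nat, firstGroupAt (c :: cs) (i + 1) = firstGroupAt cs i := by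
    intro i; simp [firstGroupAt, List.drop_succ_cons]
  calc (List.range cs.length).foldl
        (fun best i => min best (firstGroupAt (c :: cs) (i + 1))) (min 4 (firstGroupAt (c :: cs) 0))
      = (List.range cs.length).foldl
        (fun best i => min best (firstGroupAt cs i)) (min (firstGroupAt (c :: cs) 0) 4) := by
        simp only [hdrop, Nat.min_comm]
    _ = _ := pv_foldl_min_init _ _ _ _

def pvAny (g : List (List Char)) (cs : List Char) : Bool :=
  g.any (fun kw => PySem.Chars.isIn kw cs)

theorem pv_scan_eq (cs : List Char) :
    pvScan cs =
      (if pvAny (stanceGroups.getD 0 []) cs then 0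
       else if pvAny (stanceGroups.getD 1 []) cs then 1
       else if pvAny (stanceGroups.getD 2 []) cs then 2
       else if pvAny (stanceGroups.getD 3 []) cs then 3
       else 4) := by
  induction cs with
  | nil => decide
  | cons c cs ih =>
      rw [pv_scan_cons, ih]
      simp only [pvAny, stanceGroups, List.getD_cons_zero, List.getD_cons_succ, firstGroupAt,
        List.drop_zero, firstGroupLoop, pv_anyIn_cons]
      generalize (["delay".toList, "hold".toList, "validate".toList, "staging".toList].any fun kw => PySem.Chars.startswith (c :: cs) kw) = s0
      generalize (["launch".toList, "deploy".toList, "approve".toList, "move".toList].any fun kw => PySem.Chars.startswith (c :: cs) kw) = s1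
      generalize (["protocol".toList, "exception".toList, "review".toList, "governance".toList].any fun kw => PySem.Chars.startswith (c :: cs) kw) = s2
      generalize (["request".toList, "context".toList, "calendar".toList, "verify".toList].any fun kw => PySem.Chars.startswith (c :: cs) kw) = s3
      generalize (["delay".toList, "hold".toList, "validate".toList, "staging".toList].any fun kw => PySem.Chars.isIn kw cs) = r0
      generalize (["launch".toList, "deploy".toList, "approve".toList, "move".toList].any fun kw => PySem.Chars.isIn kw cs) = r1
      generalize (["protocol".toList, "exception".toList, "review".toList, "governance".toList].any fun kw => PySem.Chars.isIn kw cs) = r2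
      generalize (["request".toList, "context".toList, "calendar".toList, "verify".toList].any fun kw => PySem.Chars.isIn kw cs) = r3
      cases s0 <;> cases s1 <;> cases s2 <;> cases s3 <;> cases r0 <;> cases r1 <;> cases r2 <;> cases r3 <;> decide

-- ===== VERDICT (by name: the statement is the Claim_ definition above) =====
theorem classify_stance_py_spec : Claim_equal_classify_stance_py := by
  intro recommendation _
  show classify_stance_py recommendation = classify_stance_py_alt recommendation
  have hB : classify_stance_py_alt recommendation =
      stanceNames.getD (pvScan (PySem.Str.lower recommendation).toList) "mixed" := rfl
  rw [hB, pv_scan_eq]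
  simp only [classify_stance_py, pvAny, stanceGroups, List.getD_cons_zero, List.getD_cons_succ,
    List.any_cons, List.any_nil, PySem.Str.isIn_eq, stanceNames]
  split_ifs <;> rfl
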